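-- pv_equiv track=rewrite | github.com/mistraali/pp1 | 04-Subroutines/40.py | f
-- ===== SOURCE A (Python) =====
-- def f(number):
--     sum = 0
--     number = str(number)
--     for i in range(1,10):
--         count = 0
--         for j in number:
--             if int(j) == i: count += 1
--         if count >= 2: sum += i*count
--     return sum
-- ===== SOURCE B (Python) =====
-- def f(number):
--     counts = {}
--     for j in str(number):
--         d = int(j)
--         counts[d] = counts.get(d, 0) + 1
--     return sum(d * c for d, c in counts.items() if c >= 2)
-- ===== Notes on version B (the rewrite author's own statement) =====
-- stated objective: faster
-- what changed: One counting pass over str(number) building a digit->count table, then one walk over the table, instead of nine full scans of the string (one per digit 1..9).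
import Mathlib
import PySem

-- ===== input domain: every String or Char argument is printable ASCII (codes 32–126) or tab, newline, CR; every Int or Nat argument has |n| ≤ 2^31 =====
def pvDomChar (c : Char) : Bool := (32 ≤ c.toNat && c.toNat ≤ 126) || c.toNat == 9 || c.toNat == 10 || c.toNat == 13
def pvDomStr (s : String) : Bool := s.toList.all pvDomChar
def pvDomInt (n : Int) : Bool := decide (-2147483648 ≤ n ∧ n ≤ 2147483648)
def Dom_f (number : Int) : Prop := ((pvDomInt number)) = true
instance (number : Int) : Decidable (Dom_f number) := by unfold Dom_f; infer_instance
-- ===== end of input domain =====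

-- B replaces A's nine full scans of str(number) by one counting pass into a digit->count dict
-- followed by one walk over the dict's items.

-- ===== PORT A =====
def f (number : Int) : Int :=
  let number' := PySem.Int.toChars number   -- number = str(number)
  (PySem.List.pyRange 1 10 1).foldl (fun sum i =>
    let count := number'.foldl (fun count j =>
      if PySem.Int.ofChars? [j] = some i then count + 1 else count) (0 : Int)
    if count ≥ 2 then sum + i * count else sum) 0

-- ===== PORT B =====
def f_alt (number : Int) : Int :=
  let counts := (PySem.Int.toChars number).foldl
    (fun (counts : PySem.Dict Int Int) j =>
      match PySem.Int.ofChars? [j] with     -- d = int(j); none = ValueError, unreachable under Pre_f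
      | some d => counts.insert d (counts.getD d 0 + 1)
      | none => counts)
    PySem.Dict.empty
  counts.items.foldl (fun s p => if p.2 ≥ 2 then s + p.1 * p.2 else s) 0

-- ===== PRECONDITION & SPEC =====
-- Pre_f excludes negative numbers: str(number) then starts with '-' and int('-') raises
-- ValueError in A (and in B alike).
def Pre_f (number : Int) : Prop := 0 ≤ number
instance (number : Int) : Decidable (Pre_f number) := by unfold Pre_f; infer_instance
def pvWitness_f : Int := 1122

def Spec_f (number : Int) (out : Int) : Prop := out = f_alt number
instance (number : Int) (out : Int) : Decidable (Spec_f number out) := by unfold Spec_f; infer_instance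

-- ===== CLAIM (what is proved, stated in full; the proofs are below) =====
def Claim_equal_f : Prop := ∀ (number : Int), Dom_f number → Pre_f number → Spec_f number (f number)

-- ===== LEMMAS AND PROOFS =====

def pvDigs : List Char := ['0','1','2','3','4','5','6','7','8','9']

theorem pvToDigitsCore_mem (fuel : Nat) : ∀ (n : Nat) (acc : List Char),
    (∀ c ∈ acc, c ∈ pvDigs) → ∀ c ∈ Nat.toDigitsCore 10 fuel n acc, c ∈ pvDigs := by
  induction fuel with
  | zero => intro n acc hacc c hc; simpa [Nat.toDigitsCore] using hacc c (by simpa [Nat.toDigitsCore] using hc)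
  | succ fuel ih =>
    intro n acc hacc c hc
    have hd : (n % 10).digitChar ∈ pvDigs := by
      have h10 : n % 10 < 10 := Nat.mod_lt _ (by omega)
      interval_cases h : (n % 10) <;> simp [Nat.digitChar, pvDigs]
    rw [Nat.toDigitsCore] at hc
    by_cases h0 : n / 10 = 0
    · simp only [h0] at hc
      rcases List.mem_cons.mp hc with h | h
      · simpa [h] using hd
      · exact hacc c h
    · simp only [h0] at hc
      exact ih (n / 10) (_ :: acc)
        (fun d hdmem => by rcases List.mem_cons.mp hdmem with h | h
                           · simpa [h] using hd
                           · exact hacc d h) c hc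
theorem pvToChars_digits (n : Int) (h : 0 ≤ n) :
    ∀ c ∈ PySem.Int.toChars n, c ∈ pvDigs := by
  intro c hc
  rw [PySem.Int.toChars, if_neg (by omega)] at hc
  exact pvToDigitsCore_mem _ _ [] (by simp) c hc

theorem pvParse_digit (c : Char) (h : c ∈ pvDigs) :
    ∃ k : Int, PySem.Int.ofChars? [c] = some k ∧ 0 ≤ k ∧ k ≤ 9 := by
  fin_cases h
  · exact ⟨0, by decide, by decide, by decide⟩
  · exact ⟨1, by decide, by decide, by decide⟩
  · exact ⟨2, by decide, by decide, by decide⟩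
  · exact ⟨3, by decide, by decide, by decide⟩
  · exact ⟨4, by decide, by decide, by decide⟩
  · exact ⟨5, by decide, by decide, by decide⟩
  · exact ⟨6, by decide, by decide, by decide⟩
  · exact ⟨7, by decide, by decide, by decide⟩
  · exact ⟨8, by decide, by decide, by decide⟩
  · exact ⟨9, by decide, by decide, by decide⟩

-- B's counting loop over the chars is the counting loop over the successfully parsed digits.
theorem pvFoldl_match_filterMap (l : List Char) (g : PySem.Dict Int Int → Int → PySem.Dict Int Int)
    (init : PySem.Dict Int Int) :
    l.foldl (fun acc j => match PySem.Int.ofChars? [j] with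
                          | some d => g acc d
                          | none => acc) init
      = (l.filterMap (fun j => PySem.Int.ofChars? [j])).foldl g init := by
  induction l generalizing init with
  | nil => rfl
  | cons c t ih =>
    cases h : PySem.Int.ofChars? [c] <;> simp [h, ih]

-- dropping the terms a filter removes when they are 0
theorem pvSum_map_filter (l : List Int) (p : Int → Bool) (h : Int → Int)
    (hz : ∀ x ∈ l, p x = false → h x = 0) :
    (l.map h).sum = ((l.filter p).map h).sum := by
  induction l with
  | nil => rfl
  | cons a t ih =>
    by_cases hp : p a = true
    · simp [hp, ih (fun x hx => hz x (List.mem_cons_of_mem _ hx))]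
    · have : h a = 0 := hz a (List.mem_cons_self) (by simpa using hp)
      simp [hp, this, ih (fun x hx => hz x (List.mem_cons_of_mem _ hx))]

-- ===== VERDICT (by name: the statement is the Claim_ definition above) =====
theorem f_spec : Claim_equal_f := by
  intro number _ hpre
  unfold Spec_f f f_alt
  have hdigchars := pvToChars_digits number hpre
  set s := PySem.Int.toChars number with hs
  set digits : List Int := s.filterMap (fun j => PySem.Int.ofChars? [j]) with hdig
  -- every parsed digit is between 0 and 9
  have hbound : ∀ k ∈ digits, 0 ≤ k ∧ k ≤ 9 := by
    intro k hk
    rw [hdig, List.mem_filterMap] at hk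
    obtain ⟨c, hc, hparse⟩ := hk
    obtain ⟨k', hk', h0, h9⟩ := pvParse_digit c (hdigchars c hc)
    rw [hparse] at hk'
    injection hk' with hkk
    omega
  -- the weight of a digit
  set h : Int → Int := fun k =>
    if (digits.count k : Int) ≥ 2 then k * (digits.count k : Int) else 0 with hh
  -- A's side: sum of h over 1..9
  have hA : (PySem.List.pyRange 1 10 1).foldl (fun sum i =>
      let count := s.foldl (fun count j =>
        if PySem.Int.ofChars? [j] = some i then count + 1 else count) (0 : Int)
      if count ≥ 2 then sum + i * count else sum) 0
      = ((PySem.List.pyRange 1 10 1).map h).sum := by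
    have hcnt : ∀ i : Int, s.foldl (fun count j =>
        if PySem.Int.ofChars? [j] = some i then count + 1 else count) (0 : Int)
        = (digits.count i : Int) := by
      intro i
      rw [PySem.List.foldl_ite_add_one (fun j => PySem.Int.ofChars? [j] = some i) s 0]
      rw [hdig, List.count_filterMap]
      rw [List.countP_congr (l := s) (p := fun x => decide (PySem.Int.ofChars? [x] = some i))
        (q := fun a => PySem.Int.ofChars? [a] == some i) (fun a _ => by simp)]
      simp
    have := PySem.List.foldl_congr_mem (PySem.List.pyRange 1 10 1)
      (fun sum i =>
        let count := s.foldl (fun count j =>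
          if PySem.Int.ofChars? [j] = some i then count + 1 else count) (0 : Int)
        if count ≥ 2 then sum + i * count else sum)
      (fun sum i => sum + h i) 0
      (by intro acc i _
          simp only [hcnt i, hh]
          by_cases hge : (digits.count i : Int) ≥ 2 <;> simp [hge])
    rw [this, PySem.List.foldl_add]
    simp
  rw [hA]
  -- B's side: sum of h over the distinct digits
  have hB : ((PySem.Int.toChars number).foldl
      (fun (counts : PySem.Dict Int Int) j =>
        match PySem.Int.ofChars? [j] with
        | some d => counts.insert d (counts.getD d 0 + 1)
        | none => counts)
      PySem.Dict.empty).items.foldl (fun t p => if p.2 ≥ 2 then t + p.1 * p.2 else t) 0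
      = ((PySem.Set.ofList digits).map h).sum := by
    rw [← hs, pvFoldl_match_filterMap, ← hdig,
        PySem.Dict.foldl_insert_getD_add_one_eq_counter, PySem.Dict.items_counter]
    have := PySem.List.foldl_congr_mem
      ((PySem.Set.ofList digits).map (fun k => (k, (digits.count k : Int))))
      (fun t p => if p.2 ≥ 2 then t + p.1 * p.2 else t)
      (fun t p => t + (if p.2 ≥ 2 then p.1 * p.2 else 0)) 0
      (by intro acc p _
          by_cases hge : p.2 ≥ 2 <;> simp [hge])
    rw [this, PySem.List.foldl_add]
    simp only [List.map_map, zero_add]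
    congr 1
  rw [hB]
  -- both are the sum of h over {k ∈ 1..9 | k ∈ digits}
  set p : Int → Bool := fun k => decide (k ∈ digits ∧ 1 ≤ k) with hp
  have hz1 : ∀ x ∈ PySem.List.pyRange 1 10 1, p x = false → h x = 0 := by
    intro x hx hpf
    rw [hp] at hpf
    simp only [decide_eq_false_iff_not, not_and] at hpf
    have hx19 : 1 ≤ x ∧ x ≤ 9 := by
      have := PySem.List.mem_pyRange_one.mp hx
      omega
    have hnm : x ∉ digits := fun hmem => absurd hx19.1 (by simpa using hpf hmem)
    rw [hh]
    simp [List.count_eq_zero_of_not_mem hnm]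
  have hz2 : ∀ x ∈ PySem.Set.ofList digits, p x = false → h x = 0 := by
    intro x hx hpf
    rw [PySem.Set.mem_ofList] at hx
    rw [hp] at hpf
    simp only [decide_eq_false_iff_not, not_and] at hpf
    have hx0 : x = 0 := by
      have := hbound x hx
      have := hpf hx
      omega
    rw [hh, hx0]
    simp
  rw [pvSum_map_filter _ p h hz1, pvSum_map_filter _ p h hz2]
  have hperm : ((PySem.List.pyRange 1 10 1).filter p).Perm ((PySem.Set.ofList digits).filter p) := by
    rw [List.perm_ext_iff_of_nodup
      (List.Nodup.filter p (by decide))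
      (List.Nodup.filter p (PySem.Set.nodup_ofList digits))]
    intro a
    simp only [List.mem_filter, hp, decide_eq_true_eq, PySem.Set.mem_ofList]
    constructor
    · rintro ⟨_, hmem, h1⟩; exact ⟨hmem, hmem, h1⟩
    · rintro ⟨hmem, _, h1⟩
      refine ⟨PySem.List.mem_pyRange_one.mpr ⟨h1, ?_⟩, hmem, h1⟩
      have := hbound a hmem
      omega
  exact (hperm.map h).sum_eq
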